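-- pv_equiv track=rewrite | github.com/d0c-s4vage/lookatme | tests/utils.py | _vtext_from_text_and_style_mask
-- ===== SOURCE A (Python) =====
-- from typing import cast, Any, Dict, List, Optional, Tuple, Union
--
-- def to_vtext(fg_bg: Tuple[str, str], texts: List[str]) -> str:
--     text = "".join(texts)
--     if text == "":
--         return ""
--
--     fg, bg = fg_bg
--
--     fg = ",".join(sorted(filter(lambda x: x != "default", fg.split(","))))
--     bg = ",".join(sorted(filter(lambda x: x != "default", bg.split(","))))
--
--     parts = []
--     if fg != "":
--         parts.append("fg:" + fg)
--
--     if bg != "":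
--         parts.append("bg:" + bg)
--
--     return "<{}>{}</>".format(" ".join(parts), text)
--
-- def _vtext_from_text_and_style(text: str, style: Dict[str, str]) -> str:
--     fg = style.get("fg", "")
--     bg = style.get("bg", "")
--     return to_vtext((fg, bg), [text])
--
-- def _vtext_from_text_and_style_mask(
--     text: str, style_mask: str, styles: Dict[str, Dict[str, str]]
-- ) -> str:
--     curr_text = ""
--     curr_style = {}
--     res = []
--     for idx in range(len(text)):
--         mask = style_mask[idx]
--         style = styles[mask]
--         char = text[idx]
--         if style != curr_style and curr_text != "":
--             res.append(_vtext_from_text_and_style(curr_text, curr_style))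
--             curr_text = ""
--         curr_style = style
--         curr_text += char
--
--     res.append(_vtext_from_text_and_style(curr_text, curr_style))
--     return "".join(res)
-- ===== SOURCE B (Python) =====
-- def _fmt_run(run, style):
--     parts = []
--     for label in ("fg", "bg"):
--         val = ",".join(sorted(v for v in style.get(label, "").split(",") if v != "default"))
--         if val:
--             parts.append(label + ":" + val)
--     return "<" + " ".join(parts) + ">" + run + "</>"
--
--
-- def _vtext_from_text_and_style_mask(text, style_mask, styles):
--     # stage 1: resolve every character's style once, into an explicit pair list
--     pairs = [(c, styles[m]) for c, m in zip(text, style_mask[:len(text)])]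
--     # stage 2: repeatedly split off the maximal prefix whose styles all equal the
--     # style of the FIRST pair of the remainder (dict equality is an equivalence,
--     # so leader-comparison yields the same runs as adjacent-comparison)
--     out = []
--     while pairs:
--         style = pairs[0][1]
--         i = 1
--         while i < len(pairs) and pairs[i][1] == style:
--             i += 1
--         out.append(_fmt_run("".join(c for c, _ in pairs[:i]), style))
--         pairs = pairs[i:]
--     return "".join(out)
-- ===== Notes on version B (the rewrite author's own statement) =====
-- stated objective: alternative
-- what changed: Replaces A's single forward scan with a flush-accumulator (curr_text/curr_style, final emit through to_vtext's empty-string guard) by staged passes: first resolve every character's style into an explicit (char, style) pair list via zip, then repeatedly split off the maximal prefix whose styles equal the style of the remainder's FIRST element (leader comparison instead of adjacent comparison, correct because dict equality is an equivalence), rendering each split-off run uniformly.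
import Mathlib
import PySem

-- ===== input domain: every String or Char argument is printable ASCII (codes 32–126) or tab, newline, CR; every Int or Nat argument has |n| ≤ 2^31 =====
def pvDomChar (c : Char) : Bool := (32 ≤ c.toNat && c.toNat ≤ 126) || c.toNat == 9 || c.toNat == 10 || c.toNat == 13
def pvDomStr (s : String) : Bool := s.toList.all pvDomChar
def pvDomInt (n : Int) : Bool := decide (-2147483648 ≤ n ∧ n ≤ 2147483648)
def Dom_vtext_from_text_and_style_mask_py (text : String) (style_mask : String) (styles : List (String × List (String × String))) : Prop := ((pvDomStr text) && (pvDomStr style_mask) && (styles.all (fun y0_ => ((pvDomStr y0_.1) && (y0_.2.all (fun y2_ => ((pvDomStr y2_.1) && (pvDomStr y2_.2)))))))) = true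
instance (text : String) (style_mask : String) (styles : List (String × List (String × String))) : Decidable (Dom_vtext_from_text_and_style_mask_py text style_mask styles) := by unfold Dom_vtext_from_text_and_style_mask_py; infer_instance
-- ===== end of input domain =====

-- B replaces A's forward flush-accumulator scan by staged passes: resolve all styles into an
-- explicit (char, style) pair list first, then repeatedly split off the maximal prefix whose
-- styles equal the FIRST pair's style, rendering each run uniformly (objective: alternative).

-- shared Python primitives: dict subscript/get (assoc list, first match) and Python's dict ==
def pyLookup {α : Type} (d : List (String × α)) (k : String) : Option α :=
  (d.find? (fun p => p.1 == k)).map (·.2)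

def pyDictBeq (a b : List (String × String)) : Bool :=
  (a.map Prod.fst ++ b.map Prod.fst).all (fun k => pyLookup a k == pyLookup b k)

-- ===== PORT A =====
def to_vtext_py (fg_bg : String × String) (texts : List String) : String :=
  let text := PySem.Str.join "" texts
  if text = "" then ""
  else
    let fg := fg_bg.1
    let bg := fg_bg.2
    let fg := PySem.Str.join "," (PySem.List.sorted (((PySem.Str.split? fg ",").getD []).filter (fun x => x != "default")) (fun x => x) false)
    let bg := PySem.Str.join "," (PySem.List.sorted (((PySem.Str.split? bg ",").getD []).filter (fun x => x != "default")) (fun x => x) false)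
    let parts : List String := []
    let parts := if fg ≠ "" then parts ++ ["fg:" ++ fg] else parts
    let parts := if bg ≠ "" then parts ++ ["bg:" ++ bg] else parts
    "<" ++ PySem.Str.join " " parts ++ ">" ++ text ++ "</>"

def vtext_from_text_and_style_py_helper (text : String) (style : List (String × String)) : String :=
  let fg := (pyLookup style "fg").getD ""
  let bg := (pyLookup style "bg").getD ""
  to_vtext_py (fg, bg) [text]

-- loop body of A's 'for idx in range(len(text))' (state: curr_text as List Char, curr_style, res)
-- the .getD defaults are dead under Pre_ (style_mask[idx] IndexError / styles[mask] KeyError)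
def stepA_py (styles : List (String × List (String × String))) (tl ml : List Char)
    (st : List Char × List (String × String) × List String) (idx : Nat) :
    List Char × List (String × String) × List String :=
  let mask := (PySem.List.pyGet? ml (idx : Int)).getD ' '
  let style := (pyLookup styles (String.ofList [mask])).getD []
  let char := tl[idx]?.getD ' '
  if (!pyDictBeq style st.2.1) && (st.1 != []) then
    ([char], style, st.2.2 ++ [vtext_from_text_and_style_py_helper (String.ofList st.1) st.2.1])
  else
    (st.1 ++ [char], style, st.2.2)

def vtext_from_text_and_style_mask_py (text : String) (style_mask : String) (styles : List (String × List (String × String))) : String :=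
  let tl := text.toList
  let ml := style_mask.toList
  let fin := (List.range tl.length).foldl (stepA_py styles tl ml) ([], [], [])
  PySem.Str.join "" (fin.2.2 ++ [vtext_from_text_and_style_py_helper (String.ofList fin.1) fin.2.1])

-- ===== PORT B =====
def fmt_run_alt (run : String) (style : List (String × String)) : String :=
  let parts := (["fg", "bg"] : List String).foldl (fun parts label =>
    let val := PySem.Str.join "," (PySem.List.sorted (((PySem.Str.split? ((pyLookup style label).getD "") ",").getD []).filter (fun v => v != "default")) (fun x => x) false)
    if val ≠ "" then parts ++ [label ++ ":" ++ val] else parts) []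
  "<" ++ PySem.Str.join " " parts ++ ">" ++ run ++ "</>"

-- Source B's outer 'while pairs:' loop; the inner 'while' counts the matching pairs after the
-- head, i.e. i = 1 + length of the matching prefix of the tail (a takeWhile length); the
-- fuel argument (instantiated with the pair count, each iteration consumes i ≥ 1 pairs)
-- only makes the recursion structural and is never exhausted
def bLoopGo (fuel : Nat) (pairs : List (Char × List (String × String))) : List String :=
  match fuel, pairs with
  | _, [] => []
  | 0, _ :: _ => []
  | fuel + 1, p :: ps =>
    let style := p.2
    let i := 1 + (ps.takeWhile (fun q => pyDictBeq q.2 style)).length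
    fmt_run_alt (String.ofList (((p :: ps).take i).map Prod.fst)) style
      :: bLoopGo fuel ((p :: ps).drop i)

def bLoop (pairs : List (Char × List (String × String))) : List String :=
  bLoopGo pairs.length pairs

def vtext_from_text_and_style_mask_py_alt (text : String) (style_mask : String) (styles : List (String × List (String × String))) : String :=
  let tl := text.toList
  let pairs := (tl.zip (style_mask.toList.take tl.length)).map
      (fun cm => (cm.1, (pyLookup styles (String.ofList [cm.2])).getD []))
  PySem.Str.join "" (bLoop pairs)

-- ===== PRECONDITION & SPEC =====
-- Pre_ excludes exactly the inputs where the Python A raises: IndexError when the style mask is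
-- shorter than the text, KeyError when a used mask character is not a key of styles.
def Pre_vtext_from_text_and_style_mask_py (text : String) (style_mask : String) (styles : List (String × List (String × String))) : Prop :=
  text.toList.length ≤ style_mask.toList.length ∧
  ((style_mask.toList.take text.toList.length).all (fun c => styles.any (fun p => p.1.toList == [c]))) = true
instance (text : String) (style_mask : String) (styles : List (String × List (String × String))) : Decidable (Pre_vtext_from_text_and_style_mask_py text style_mask styles) := by unfold Pre_vtext_from_text_and_style_mask_py; infer_instance

def pvWitness_vtext_from_text_and_style_mask_py : String × String × (List (String × List (String × String))) :=
  ("abc", "xyy", [("x", [("fg", "red")]), ("y", [("bg", "blue"), ("fg", "red")])])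

def Spec_vtext_from_text_and_style_mask_py (text : String) (style_mask : String) (styles : List (String × List (String × String))) (out : String) : Prop := out = vtext_from_text_and_style_mask_py_alt text style_mask styles
instance (text : String) (style_mask : String) (styles : List (String × List (String × String))) (out : String) : Decidable (Spec_vtext_from_text_and_style_mask_py text style_mask styles out) := by unfold Spec_vtext_from_text_and_style_mask_py; infer_instance

-- ===== CLAIM (what is proved, stated in full; the proofs are below) =====
def Claim_equal_vtext_from_text_and_style_mask_py : Prop := ∀ (text : String) (style_mask : String) (styles : List (String × List (String × String))), Dom_vtext_from_text_and_style_mask_py text style_mask styles → Pre_vtext_from_text_and_style_mask_py text style_mask styles → Spec_vtext_from_text_and_style_mask_py text style_mask styles (vtext_from_text_and_style_mask_py text style_mask styles)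


-- ===== LEMMAS AND PROOFS =====

-- the per-index resolved (char, style) pair both loops work on
def pvPair (styles : List (String × List (String × String))) (tl ml : List Char) (i : Nat) : Char × List (String × String) :=
  (tl[i]?.getD ' ', (pyLookup styles (String.ofList [(PySem.List.pyGet? ml (i : Int)).getD ' '])).getD [])

-- A's loop body on resolved pairs
def pvStepA (st : List Char × List (String × String) × List String) (p : Char × List (String × String)) :
    List Char × List (String × String) × List String :=
  if (!pyDictBeq p.2 st.2.1) && (st.1 != []) then
    ([p.1], p.2, st.2.2 ++ [vtext_from_text_and_style_py_helper (String.ofList st.1) st.2.1])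
  else
    (st.1 ++ [p.1], p.2, st.2.2)

-- proof-side adjacent-merge step: consuming the pairs back to front, prepend or merge into
-- the front run (the common shape both programs' run lists are reduced to)
def pvStepB (p : Char × List (String × String)) (runs : List (List Char × List (String × String))) :
    List (List Char × List (String × String)) :=
  match runs with
  | (r, s) :: more => if pyDictBeq s p.2 then (p.1 :: r, p.2) :: more else ([p.1], p.2) :: (r, s) :: more
  | [] => [([p.1], p.2)]

def pvMerge (ct : List Char) (cs : List (String × String)) (runs : List (List Char × List (String × String))) :
    List (List Char × List (String × String)) :=
  match runs with
  | (r, s) :: more => if pyDictBeq s cs then (ct ++ r, cs) :: more else (ct, cs) :: (r, s) :: more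
  | [] => [(ct, cs)]

lemma pyLookup_eq_of_beq (a b : List (String × String)) (h : pyDictBeq a b = true) (k : String) :
    pyLookup a k = pyLookup b k := by
  unfold pyDictBeq at h
  rw [List.all_eq_true] at h
  by_cases ha : k ∈ a.map Prod.fst
  · have := h k (by simp [ha]); simpa using this
  · by_cases hb : k ∈ b.map Prod.fst
    · have := h k (by simp [hb]); simpa using this
    · have hna : pyLookup a k = none := by
        unfold pyLookup
        rw [List.find?_eq_none.mpr]
        · rfl
        · intro p hp hbe
          exact ha (List.mem_map.mpr ⟨p, hp, by simpa using hbe⟩)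
      have hnb : pyLookup b k = none := by
        unfold pyLookup
        rw [List.find?_eq_none.mpr]
        · rfl
        · intro p hp hbe
          exact hb (List.mem_map.mpr ⟨p, hp, by simpa using hbe⟩)
      rw [hna, hnb]

lemma pyDictBeq_of_lookup_eq (a b : List (String × String)) (h : ∀ k, pyLookup a k = pyLookup b k) :
    pyDictBeq a b = true := by
  unfold pyDictBeq
  rw [List.all_eq_true]
  intro k _
  simp [h k]

-- equal dicts are interchangeable on either side of a dict comparison
lemma pyDictBeq_congr_right (a b x : List (String × String)) (h : pyDictBeq a b = true) :
    pyDictBeq x a = pyDictBeq x b := by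
  have hl := pyLookup_eq_of_beq a b h
  by_cases hx : pyDictBeq x a = true
  · rw [hx]
    exact (pyDictBeq_of_lookup_eq x b (fun k => (pyLookup_eq_of_beq x a hx k).trans (hl k))).symm
  · by_cases hy : pyDictBeq x b = true
    · exact absurd (pyDictBeq_of_lookup_eq x a (fun k => (pyLookup_eq_of_beq x b hy k).trans (hl k).symm)) hx
    · rw [Bool.eq_false_iff.mpr hx, Bool.eq_false_iff.mpr hy]

lemma fmt_run_alt_congr (r : String) (a b : List (String × String)) (h : pyDictBeq a b = true) :
    fmt_run_alt r a = fmt_run_alt r b := by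
  unfold fmt_run_alt
  simp only [pyLookup_eq_of_beq a b h]

lemma mk_ne_empty (ct : List Char) (h : ct ≠ []) : String.ofList ct ≠ "" := by
  intro hc
  apply h
  have h2 := congrArg String.toList hc
  simpa using h2

lemma helper_eq_fmt (ct : List Char) (cs : List (String × String)) (h : ct ≠ []) :
    vtext_from_text_and_style_py_helper (String.ofList ct) cs = fmt_run_alt (String.ofList ct) cs := by
  unfold vtext_from_text_and_style_py_helper to_vtext_py fmt_run_alt
  have hj : PySem.Str.join "" [String.ofList ct] = String.ofList ct := by
    simp [PySem.Str.join, PySem.Chars.join_singleton]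
  rw [hj]
  rw [if_neg (mk_ne_empty ct h)]
  simp only [List.foldl]
  have hfg : ("fg" : String) ++ ":" = "fg:" := by decide
  have hbg : ("bg" : String) ++ ":" = "bg:" := by decide
  rw [hfg, hbg]

-- the core invariant of A's scan: the flush-accumulator fold, finished off, equals the
-- adjacent-merge run list with the pending run (ct, cs) merged in at the front
lemma pv_main (ps : List (Char × List (String × String))) :
    ∀ (ct : List Char) (cs : List (String × String)) (res : List String), ct ≠ [] →
    (fun st => st.2.2 ++ [vtext_from_text_and_style_py_helper (String.ofList st.1) st.2.1]) (ps.foldl pvStepA (ct, cs, res))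
      = res ++ (pvMerge ct cs (ps.foldr pvStepB [])).map (fun p => fmt_run_alt (String.ofList p.1) p.2) := by
  induction ps with
  | nil =>
    intro ct cs res h
    simp [pvMerge, helper_eq_fmt ct cs h]
  | cons p ps ih =>
    intro ct cs res h
    obtain ⟨c, s⟩ := p
    rw [List.foldl_cons, List.foldr_cons]
    by_cases hb : pyDictBeq s cs = true
    · have hstep : pvStepA (ct, cs, res) (c, s) = (ct ++ [c], s, res) := by
        simp [pvStepA, hb]
      rw [hstep, ih (ct ++ [c]) s res (by simp)]
      congr 1
      cases hR : ps.foldr pvStepB [] with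
      | nil =>
        simp [pvStepB, pvMerge, hb, fmt_run_alt_congr _ s cs hb]
      | cons q more =>
        obtain ⟨r, s'⟩ := q
        by_cases hb2 : pyDictBeq s' s = true
        · simp [pvStepB, pvMerge, hb, hb2, fmt_run_alt_congr _ s cs hb]
        · simp [pvStepB, pvMerge, hb, hb2, fmt_run_alt_congr _ s cs hb]
    · have hstep : pvStepA (ct, cs, res) (c, s)
          = ([c], s, res ++ [vtext_from_text_and_style_py_helper (String.ofList ct) cs]) := by
        simp [pvStepA, hb, h]
      rw [hstep, ih [c] s _ (by simp)]
      rw [List.append_assoc]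
      congr 1
      rw [helper_eq_fmt ct cs h]
      cases hR : ps.foldr pvStepB [] with
      | nil =>
        simp [pvStepB, pvMerge, hb]
      | cons q more =>
        obtain ⟨r, s'⟩ := q
        by_cases hb2 : pyDictBeq s' s = true
        · simp [pvStepB, pvMerge, hb, hb2]
        · simp [pvStepB, pvMerge, hb, hb2]

lemma pvStepB_eq_merge (c : Char) (s : List (String × String)) (runs : List (List Char × List (String × String))) :
    pvStepB (c, s) runs = pvMerge [c] s runs := by
  cases runs with
  | nil => rfl
  | cons q more =>
    obtain ⟨r, s'⟩ := q
    by_cases hb : pyDictBeq s' s = true <;> simp [pvStepB, pvMerge, hb]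

lemma pv_main0 (ps : List (Char × List (String × String))) :
    PySem.Str.join "" ((fun st => st.2.2 ++ [vtext_from_text_and_style_py_helper (String.ofList st.1) st.2.1]) (ps.foldl pvStepA ([], [], [])))
      = PySem.Str.join "" ((ps.foldr pvStepB []).map (fun p => fmt_run_alt (String.ofList p.1) p.2)) := by
  cases ps with
  | nil => decide
  | cons p ps =>
    obtain ⟨c, s⟩ := p
    rw [List.foldl_cons, List.foldr_cons]
    have hstep : pvStepA ([], [], []) (c, s) = ([c], s, []) := by
      simp [pvStepA]
    rw [hstep, pv_main ps [c] s [] (by simp), pvStepB_eq_merge]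
    simp

lemma stepA_py_eq (styles : List (String × List (String × String))) (tl ml : List Char) :
    stepA_py styles tl ml = fun st i => pvStepA st (pvPair styles tl ml i) := by
  funext st i
  simp [stepA_py, pvStepA, pvPair]

-- two small takeWhile facts B's splitting reduces to (take/drop at the takeWhile length)
lemma take_len_takeWhile {α : Type} (p : α → Bool) : ∀ l : List α, l.take (l.takeWhile p).length = l.takeWhile p := by
  intro l
  induction l with
  | nil => rfl
  | cons a l ih =>
    by_cases hp : p a = true
    · simp [hp, ih]
    · simp [Bool.eq_false_iff.mpr hp]

lemma drop_len_takeWhile {α : Type} (p : α → Bool) : ∀ l : List α, l.drop (l.takeWhile p).length = l.dropWhile p := by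
  intro l
  induction l with
  | nil => rfl
  | cons a l ih =>
    by_cases hp : p a = true
    · simp [hp, ih]
    · simp [Bool.eq_false_iff.mpr hp]

-- the adjacent-merge foldr splits at the leader's takeWhile: head run = maximal prefix whose
-- styles equal the FIRST element's style (adjacent = leader comparison, dict eq is transitive)
lemma foldr_cons_span : ∀ (ps : List (Char × List (String × String))) (p : Char × List (String × String)),
    (p :: ps).foldr pvStepB []
      = (p.1 :: (ps.takeWhile (fun q => pyDictBeq q.2 p.2)).map Prod.fst, p.2)
        :: (ps.dropWhile (fun q => pyDictBeq q.2 p.2)).foldr pvStepB [] := by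
  intro ps
  induction ps with
  | nil => intro p; rfl
  | cons q qs ih =>
    intro p
    by_cases hb : pyDictBeq q.2 p.2 = true
    · have hfun : (fun q' : Char × List (String × String) => pyDictBeq q'.2 p.2)
          = (fun q' : Char × List (String × String) => pyDictBeq q'.2 q.2) := by
        funext q'
        exact (pyDictBeq_congr_right q.2 p.2 q'.2 hb).symm
      rw [List.foldr_cons, ih q]
      simp only [pvStepB, List.takeWhile_cons, List.dropWhile_cons]
      rw [if_pos hb, if_pos hb, if_pos hb, hfun]
      simp
    · rw [List.foldr_cons, ih q]
      simp only [pvStepB, List.takeWhile_cons, List.dropWhile_cons]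
      rw [if_neg hb, if_neg hb, if_neg hb, ih q]
      simp

-- B's split-off loop produces exactly the rendering of the adjacent-merge run list
lemma bLoopGo_eq : ∀ (fuel : Nat) (ps : List (Char × List (String × String))), ps.length ≤ fuel →
    bLoopGo fuel ps = (ps.foldr pvStepB []).map (fun r => fmt_run_alt (String.ofList r.1) r.2) := by
  intro fuel
  induction fuel with
  | zero =>
    intro ps hps
    rw [List.length_eq_zero_iff.mp (Nat.le_zero.mp hps)]
    rfl
  | succ fuel ih =>
    intro ps hps
    match ps with
    | [] => rfl
    | p :: ps =>
      rw [bLoopGo, foldr_cons_span]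
      have htake : (p :: ps).take (1 + (ps.takeWhile (fun q => pyDictBeq q.2 p.2)).length)
          = p :: ps.takeWhile (fun q => pyDictBeq q.2 p.2) := by
        rw [Nat.add_comm, List.take_succ_cons, take_len_takeWhile]
      have hdrop : (p :: ps).drop (1 + (ps.takeWhile (fun q => pyDictBeq q.2 p.2)).length)
          = ps.dropWhile (fun q => pyDictBeq q.2 p.2) := by
        rw [Nat.add_comm, List.drop_succ_cons, drop_len_takeWhile]
      rw [htake, hdrop, ih _ (le_trans (List.length_dropWhile_le _ _) (Nat.le_of_succ_le_succ hps))]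
      simp

lemma bLoop_eq (ps : List (Char × List (String × String))) :
    bLoop ps = (ps.foldr pvStepB []).map (fun r => fmt_run_alt (String.ofList r.1) r.2) :=
  bLoopGo_eq ps.length ps le_rfl

-- under Pre_, B's zip-resolved pair list is exactly the per-index pvPair list A's loop visits
lemma pairs_eq (styles : List (String × List (String × String))) (tl ml : List Char)
    (hlen : tl.length ≤ ml.length) :
    (tl.zip (ml.take tl.length)).map (fun cm => (cm.1, (pyLookup styles (String.ofList [cm.2])).getD []))
      = (List.range tl.length).map (pvPair styles tl ml) := by
  apply List.ext_getElem
  · simp [Nat.min_def]; omega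
  · intro i h1 h2
    have hi : i < tl.length := by simpa using h2
    have him : i < ml.length := lt_of_lt_of_le hi hlen
    simp [pvPair, PySem.List.pyGet?, PySem.List.pyIdx?, hi, him]

-- ===== VERDICT (by name: the statements are the Claim_ definitions above) =====
set_option maxHeartbeats 1600000 in
theorem vtext_from_text_and_style_mask_py_spec : Claim_equal_vtext_from_text_and_style_mask_py := by
  intro text style_mask styles _ hpre
  unfold Spec_vtext_from_text_and_style_mask_py
  simp only [vtext_from_text_and_style_mask_py, vtext_from_text_and_style_mask_py_alt]
  rw [stepA_py_eq, pairs_eq styles text.toList style_mask.toList hpre.1, bLoop_eq]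
  rw [← List.foldl_map (f := pvPair styles text.toList style_mask.toList) (g := pvStepA)
        (l := List.range text.toList.length) (init := (([], [], []) : List Char × List (String × String) × List String))]
  exact pv_main0 _
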